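-- pv_equiv track=rewrite | github.com/gaju91/dsa-journey | 01-fundamentals/00-arrays/algorithms/05_reverse_rotate.py | rotate_and_query
-- ===== SOURCE A (Python) =====
-- def rotate_and_query(arr, rotations, queries):
--     """
--     After rotating, answer element queries
--
--     Example: After rotating [1,2,3,4,5] right by 2,
--     what's at index 1? → 5
--
--     TRICK: Don't actually rotate! Calculate new position!
--
--     Time: O(q) for q queries
--     Space: O(1)
--     """
--     n = len(arr)
--     k = rotations % n
--
--     results = []
--     for query_idx in queries:
--         # Original position of element now at query_idx
--         original_idx = (query_idx - k + n) % n
--         results.append(arr[original_idx])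
--
--     return results
-- ===== SOURCE B (Python) =====
-- def rotate_and_query(arr, rotations, queries):
--     n = len(arr)
--     k = rotations % n
--     rotated = arr[n - k:] + arr[:n - k]
--     return [rotated[q % n] for q in queries]
-- ===== Notes on version B (the rewrite author's own statement) =====
-- stated objective: alternative
-- what changed: B materializes the rotated array once with two slices and answers each query by direct indexing, instead of recomputing an original position per query; O(n) space instead of O(1).
import Mathlib
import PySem

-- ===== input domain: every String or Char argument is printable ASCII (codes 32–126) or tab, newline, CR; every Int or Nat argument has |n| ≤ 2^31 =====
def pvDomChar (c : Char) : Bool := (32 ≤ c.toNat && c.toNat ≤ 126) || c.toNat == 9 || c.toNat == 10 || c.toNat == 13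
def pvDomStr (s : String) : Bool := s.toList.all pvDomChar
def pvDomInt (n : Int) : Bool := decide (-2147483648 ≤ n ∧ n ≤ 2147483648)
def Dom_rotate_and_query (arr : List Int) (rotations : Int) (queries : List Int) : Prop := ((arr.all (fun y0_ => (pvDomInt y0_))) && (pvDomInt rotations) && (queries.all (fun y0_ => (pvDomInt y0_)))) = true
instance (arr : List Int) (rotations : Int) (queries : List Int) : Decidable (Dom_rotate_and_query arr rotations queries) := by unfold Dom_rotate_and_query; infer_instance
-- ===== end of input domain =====

-- B builds the rotated array once with two slices and answers queries by direct indexing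
-- (alternative decomposition, same asymptotic cost per query).

-- ===== PORT A =====
def rotate_and_query (arr : List Int) (rotations : Int) (queries : List Int) : List Int :=
  let n : Int := arr.length
  let k : Int := PySem.Int.mod rotations n
  queries.foldl
    (fun results query_idx =>
      results ++ [PySem.List.pyGetD arr (PySem.Int.mod (query_idx - k + n) n) 0]) []

-- ===== PORT B =====
def rotate_and_query_alt (arr : List Int) (rotations : Int) (queries : List Int) : List Int :=
  let n : Int := arr.length
  let k : Int := PySem.Int.mod rotations n
  let rotated : List Int :=
    PySem.List.slice arr (some (n - k)) none ++ PySem.List.slice arr none (some (n - k))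
  queries.map (fun q => PySem.List.pyGetD rotated (PySem.Int.mod q n) 0)

-- ===== PRECONDITION & SPEC =====
-- Pre_ excludes the empty array, on which Python's 'rotations % n' raises ZeroDivisionError.
def Pre_rotate_and_query (arr : List Int) (rotations : Int) (queries : List Int) : Prop := arr ≠ []
instance (arr : List Int) (rotations : Int) (queries : List Int) : Decidable (Pre_rotate_and_query arr rotations queries) := by unfold Pre_rotate_and_query; infer_instance
def pvWitness_rotate_and_query : List Int × Int × List Int := ([10, 20, 30, 40, 50], 2, [0, 1, -1, 7])

def Spec_rotate_and_query (arr : List Int) (rotations : Int) (queries : List Int) (out : List Int) : Prop := out = rotate_and_query_alt arr rotations queries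
instance (arr : List Int) (rotations : Int) (queries : List Int) (out : List Int) : Decidable (Spec_rotate_and_query arr rotations queries out) := by unfold Spec_rotate_and_query; infer_instance

-- ===== CLAIM (what is proved, stated in full; the proofs are below) =====
def Claim_equal_rotate_and_query : Prop := ∀ (arr : List Int) (rotations : Int) (queries : List Int), Dom_rotate_and_query arr rotations queries → Pre_rotate_and_query arr rotations queries → Spec_rotate_and_query arr rotations queries (rotate_and_query arr rotations queries)

-- ===== LEMMAS AND PROOFS =====

-- Pointwise key fact: for 0 ≤ k < n = len arr, A's per-query index into arr
-- reads the same element as B's index into the rotated array.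
theorem pv_point (arr : List Int) (k q : Int)
    (hne : arr ≠ []) (hk0 : 0 ≤ k) (hkn : k < (arr.length : Int)) :
    PySem.List.pyGetD arr (PySem.Int.mod (q - k + (arr.length : Int)) (arr.length : Int)) 0 =
      PySem.List.pyGetD
        (arr.drop ((arr.length : Int) - k).toNat ++ arr.take ((arr.length : Int) - k).toNat)
        (PySem.Int.mod q (arr.length : Int)) 0 := by
  have hn : 0 < (arr.length : Int) := by
    have := List.length_pos_of_ne_nil hne; exact_mod_cast this
  set n : Int := (arr.length : Int) with hn_def
  have hi0 : 0 ≤ PySem.Int.mod q n := PySem.Int.mod_nonneg q hn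
  have hin : PySem.Int.mod q n < n := PySem.Int.mod_lt q hn
  set i : Int := PySem.Int.mod q n with hi_def
  -- characterize A's index j in terms of i
  have hmod : PySem.Int.mod (q - k + n) n = if i < k then i - k + n else i - k := by
    have hq : q % n = i := by
      rw [hi_def, PySem.Int.mod_eq_emod_of_pos hn]
    rw [PySem.Int.mod_eq_emod_of_pos hn]
    have hdecomp : q - k + n = (q % n - k + n) + n * (q / n) := by
      have := Int.emod_add_mul_ediv q n; ring_nf; omega
    rw [hdecomp, Int.add_mul_emod_self_left, hq]
    split_ifs with h
    · have : (i - k + n) % n = (i - k + n) := Int.emod_eq_of_lt (by omega) (by omega)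
      omega
    · have h1 : i - k + n = (i - k) + n * 1 := by ring
      rw [h1, Int.add_mul_emod_self_left]
      exact Int.emod_eq_of_lt (by omega) (by omega)
  rw [hmod]
  have hlen : (arr.drop (n - k).toNat ++ arr.take (n - k).toNat).length = arr.length := by
    simp; omega
  split_ifs with h
  · rw [PySem.List.pyGetD_eq_getElem _ 0 (by omega) (by simp [← hn_def]; omega),
        PySem.List.pyGetD_eq_getElem _ 0 hi0 (by rw [hlen, ← hn_def]; exact hin)]
    rw [List.getElem_append_left (by simp; omega)]
    rw [List.getElem_drop]
    congr 1
    omega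
  · rw [PySem.List.pyGetD_eq_getElem _ 0 (by omega) (by simp [← hn_def]; omega),
        PySem.List.pyGetD_eq_getElem _ 0 hi0 (by rw [hlen, ← hn_def]; exact hin)]
    rw [List.getElem_append_right (by simp; omega)]
    rw [List.getElem_take]
    congr 1
    simp
    omega

-- ===== VERDICT (by name: the statement is the Claim_ definition above) =====
theorem rotate_and_query_spec : Claim_equal_rotate_and_query := by
  intro arr rotations queries _ hpre
  unfold Spec_rotate_and_query rotate_and_query rotate_and_query_alt
  simp only []
  have hn : 0 < (arr.length : Int) := by
    have := List.length_pos_of_ne_nil hpre; exact_mod_cast this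
  set n : Int := (arr.length : Int) with hn_def
  set k : Int := PySem.Int.mod rotations n with hk_def
  have hk0 : 0 ≤ k := PySem.Int.mod_nonneg _ hn
  have hkn : k < n := PySem.Int.mod_lt _ hn
  rw [PySem.List.foldl_append_singleton_eq_map]
  rw [PySem.List.slice_from arr (show (0:Int) ≤ n - k by omega), PySem.List.slice_to arr (show (0:Int) ≤ n - k by omega)]
  apply List.map_congr_left
  intro q _
  exact pv_point arr k q hpre hk0 hkn
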